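-- pv_equiv track=rewrite | github.com/aldringalera12/vector-db-chatbot | chatbot.py | apply_special_handling
-- ===== SOURCE A (Python) =====
-- from typing import List, Dict
--
-- def apply_special_handling(query_lower: str, search_results: List[Dict], current_best_match) -> Dict:
--     """Apply special handling logic for specific query types."""
--     best_match = current_best_match
--
--     # Special handling for cross-enrollment queries
--     if any(word in query_lower for word in ['inbound', 'outbound', 'in campus', 'out campus']):
--         for result in search_results:
--             term_lower = result.get('term', '').lower()
--             if 'inbound' in query_lower and 'inbound' in term_lower:
--                 return result
--             elif 'outbound' in query_lower and 'outbound' in term_lower: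
--                 return result
--             elif 'in campus' in query_lower and 'in campus' in term_lower:
--                 return result
--             elif 'out campus' in query_lower and 'out campus' in term_lower:
--                 return result
--
--     # Special handling for sports vs culture incentive queries
--     if any(word in query_lower for word in ['sports', 'athlete', 'winning athletes']):
--         for result in search_results:
--             term_lower = result.get('term', '').lower()
--             if 'sports' in term_lower:
--                 return result
--     elif any(word in query_lower for word in ['culture', 'arts', 'cado']):
--         for result in search_results:
--             term_lower = result.get('term', '').lower()
--             if 'culture' in term_lower and 'arts' in term_lower:
--                 return result
--
--     # Special handling for complex multi-conditional queries
--     if any(word in query_lower for word in ['conditions', 'requirements', 'four conditions', 'five requirements', 'beyond gpa']):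
--         # For graduation honors conditions beyond GPA
--         if 'honors' in query_lower and 'beyond' in query_lower:
--             for result in search_results:
--                 term_lower = result.get('term', '').lower()
--                 if 'graduation honors additional conditions' in term_lower:
--                     return result
--         # For PWD facilities
--         elif 'facilities' in query_lower and ('disability' in query_lower or 'pwd' in query_lower):
--             for result in search_results:
--                 term_lower = result.get('term', '').lower()
--                 if 'pwd campus facilities' in term_lower:
--                     return result
--         # For mid-year LOA rationale
--         elif 'mid-year' in query_lower and ('unnecessary' in query_lower or 'why' in query_lower):
--             for result in search_results:
--                 term_lower = result.get('term', '').lower()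
--                 if 'mid-year' in term_lower and 'policy' in term_lower:
--                     return result
--
--     return best_match
-- ===== SOURCE B (Python) =====
-- def apply_special_handling(query_lower, search_results, current_best_match):
--     """Single-pass rewrite: compile the query's active rules into term predicates
--     (in priority order), then sweep search_results ONCE, recording the first hit
--     of each predicate in a parallel slot; the answer is the first filled slot."""
--     preds = []
--     cross = [t for t in ('inbound', 'outbound', 'in campus', 'out campus') if t in query_lower]
--     if cross:
--         preds.append(lambda term: any(c in term for c in cross))
--     if any(w in query_lower for w in ('sports', 'athlete', 'winning athletes')):
--         preds.append(lambda term: 'sports' in term)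
--     elif any(w in query_lower for w in ('culture', 'arts', 'cado')):
--         preds.append(lambda term: 'culture' in term and 'arts' in term)
--     if any(w in query_lower for w in ('conditions', 'requirements', 'four conditions',
--                                       'five requirements', 'beyond gpa')):
--         if 'honors' in query_lower and 'beyond' in query_lower:
--             preds.append(lambda term: 'graduation honors additional conditions' in term)
--         elif 'facilities' in query_lower and ('disability' in query_lower or 'pwd' in query_lower):
--             preds.append(lambda term: 'pwd campus facilities' in term)
--         elif 'mid-year' in query_lower and ('unnecessary' in query_lower or 'why' in query_lower):
--             preds.append(lambda term: 'mid-year' in term and 'policy' in term)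
--
--     hits = [None] * len(preds)
--     for result in search_results:
--         term = result.get('term', '').lower()
--         for i, p in enumerate(preds):
--             if hits[i] is None and p(term):
--                 hits[i] = result
--     for h in hits:
--         if h is not None:
--             return h
--     return current_best_match
-- ===== Notes on version B (the rewrite author's own statement) =====
-- stated objective: alternative
-- what changed: Instead of A's up-to-three separate sequential scans of search_results (one per special-handling block), B compiles the query's active rules into term predicates once and then makes a SINGLE pass over search_results, filling a parallel first-hit slot per predicate, returning the highest-priority filled slot.
import Mathlib
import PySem

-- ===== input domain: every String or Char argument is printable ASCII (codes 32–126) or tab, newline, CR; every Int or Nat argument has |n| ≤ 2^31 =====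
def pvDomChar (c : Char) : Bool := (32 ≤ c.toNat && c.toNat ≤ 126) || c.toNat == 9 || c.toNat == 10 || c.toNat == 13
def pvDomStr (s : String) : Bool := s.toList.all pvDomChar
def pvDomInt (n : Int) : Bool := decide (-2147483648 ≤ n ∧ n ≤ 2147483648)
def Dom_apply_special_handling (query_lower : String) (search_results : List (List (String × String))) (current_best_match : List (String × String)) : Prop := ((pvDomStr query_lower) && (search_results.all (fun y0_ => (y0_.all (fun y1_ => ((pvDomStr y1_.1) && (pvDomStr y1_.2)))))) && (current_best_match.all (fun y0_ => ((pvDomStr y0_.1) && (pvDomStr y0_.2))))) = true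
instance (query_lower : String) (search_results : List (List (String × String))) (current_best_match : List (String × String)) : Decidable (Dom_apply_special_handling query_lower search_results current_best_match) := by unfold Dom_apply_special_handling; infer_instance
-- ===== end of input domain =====

-- B replaces A's up-to-three sequential scans of search_results by ONE pass that fills a parallel
-- slot per active query rule with its first hit (objective: alternative, same asymptotic cost).

-- ===== PORT A =====

-- result.get('term', '').lower()  (shared primitive step, identical in both Pythons)
def pvTerm (r : List (String × String)) : String :=
  PySem.Str.lower ((PySem.Dict.mk r).getD "term" "")

-- the cross-enrollment for-loop with its elif chain
def aLoop1 (q : String) : List (List (String × String)) → Option (List (String × String))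
  | [] => none
  | r :: rest =>
    let t := pvTerm r
    if PySem.Str.isIn "inbound" q && PySem.Str.isIn "inbound" t then some r
    else if PySem.Str.isIn "outbound" q && PySem.Str.isIn "outbound" t then some r
    else if PySem.Str.isIn "in campus" q && PySem.Str.isIn "in campus" t then some r
    else if PySem.Str.isIn "out campus" q && PySem.Str.isIn "out campus" t then some r
    else aLoop1 q rest

def aLoopSports : List (List (String × String)) → Option (List (String × String))
  | [] => none
  | r :: rest =>
    if PySem.Str.isIn "sports" (pvTerm r) then some r else aLoopSports rest

def aLoopCulture : List (List (String × String)) → Option (List (String × String))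
  | [] => none
  | r :: rest =>
    if PySem.Str.isIn "culture" (pvTerm r) && PySem.Str.isIn "arts" (pvTerm r) then some r
    else aLoopCulture rest

def aLoopHonors : List (List (String × String)) → Option (List (String × String))
  | [] => none
  | r :: rest =>
    if PySem.Str.isIn "graduation honors additional conditions" (pvTerm r) then some r
    else aLoopHonors rest

def aLoopPwd : List (List (String × String)) → Option (List (String × String))
  | [] => none
  | r :: rest =>
    if PySem.Str.isIn "pwd campus facilities" (pvTerm r) then some r else aLoopPwd rest

def aLoopMid : List (List (String × String)) → Option (List (String × String))
  | [] => none
  | r :: rest =>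
    if PySem.Str.isIn "mid-year" (pvTerm r) && PySem.Str.isIn "policy" (pvTerm r) then some r
    else aLoopMid rest

def apply_special_handling (query_lower : String) (search_results : List (List (String × String))) (current_best_match : List (String × String)) : List (String × String) :=
  let best_match := current_best_match
  -- block 1: cross-enrollment (early return modelled as Option)
  match (if ["inbound", "outbound", "in campus", "out campus"].any (fun w => PySem.Str.isIn w query_lower)
         then aLoop1 query_lower search_results else none) with
  | some r => r
  | none =>
    -- block 2: sports vs culture
    match (if ["sports", "athlete", "winning athletes"].any (fun w => PySem.Str.isIn w query_lower)
           then aLoopSports search_results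
           else if ["culture", "arts", "cado"].any (fun w => PySem.Str.isIn w query_lower)
           then aLoopCulture search_results else none) with
    | some r => r
    | none =>
      -- block 3: multi-conditional queries
      match (if ["conditions", "requirements", "four conditions", "five requirements", "beyond gpa"].any (fun w => PySem.Str.isIn w query_lower)
             then (if PySem.Str.isIn "honors" query_lower && PySem.Str.isIn "beyond" query_lower
                   then aLoopHonors search_results
                   else if PySem.Str.isIn "facilities" query_lower && (PySem.Str.isIn "disability" query_lower || PySem.Str.isIn "pwd" query_lower)
                   then aLoopPwd search_results
                   else if PySem.Str.isIn "mid-year" query_lower && (PySem.Str.isIn "unnecessary" query_lower || PySem.Str.isIn "why" query_lower)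
                   then aLoopMid search_results
                   else none)
             else none) with
      | some r => r
      | none => best_match

-- ===== PORT B =====

-- the active term predicates compiled from the query, in priority order (Source B's `preds`)
def bPreds (q : String) : List (String → Bool) :=
  (let cross := ["inbound", "outbound", "in campus", "out campus"].filter (fun t => PySem.Str.isIn t q)
   if !cross.isEmpty then [fun term => cross.any (fun c => PySem.Str.isIn c term)] else [])
  ++ (if ["sports", "athlete", "winning athletes"].any (fun w => PySem.Str.isIn w q) then
        [fun term => PySem.Str.isIn "sports" term]
      else if ["culture", "arts", "cado"].any (fun w => PySem.Str.isIn w q) then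
        [fun term => PySem.Str.isIn "culture" term && PySem.Str.isIn "arts" term]
      else [])
  ++ (if ["conditions", "requirements", "four conditions", "five requirements", "beyond gpa"].any (fun w => PySem.Str.isIn w q) then
        (if PySem.Str.isIn "honors" q && PySem.Str.isIn "beyond" q then
           [fun term => PySem.Str.isIn "graduation honors additional conditions" term]
         else if PySem.Str.isIn "facilities" q && (PySem.Str.isIn "disability" q || PySem.Str.isIn "pwd" q) then
           [fun term => PySem.Str.isIn "pwd campus facilities" term]
         else if PySem.Str.isIn "mid-year" q && (PySem.Str.isIn "unnecessary" q || PySem.Str.isIn "why" q) then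
           [fun term => PySem.Str.isIn "mid-year" term && PySem.Str.isIn "policy" term]
         else [])
      else [])

-- one result updates the parallel hit slots (the inner `for i, p in enumerate(preds)` loop)
def bUpdate (r : List (String × String)) (preds : List (String → Bool)) (hits : List (Option (List (String × String)))) : List (Option (List (String × String))) :=
  match preds, hits with
  | p :: ps, h :: hs =>
    (if h.isNone && p (pvTerm r) then some r else h) :: bUpdate r ps hs
  | _, _ => hits

-- the single pass over search_results
def bPass (preds : List (String → Bool)) (srs : List (List (String × String))) (hits : List (Option (List (String × String)))) : List (Option (List (String × String))) :=
  match srs with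
  | [] => hits
  | r :: rest => bPass preds rest (bUpdate r preds hits)

-- the final `for h in hits: if h is not None: return h`
def bFirst : List (Option (List (String × String))) → Option (List (String × String))
  | [] => none
  | some r :: _ => some r
  | none :: hs => bFirst hs

def apply_special_handling_alt (query_lower : String) (search_results : List (List (String × String))) (current_best_match : List (String × String)) : List (String × String) :=
  let preds := bPreds query_lower
  let hits := bPass preds search_results (List.replicate preds.length none)
  (bFirst hits).getD current_best_match

-- ===== PRECONDITION & SPEC =====
def Spec_apply_special_handling (query_lower : String) (search_results : List (List (String × String))) (current_best_match : List (String × String)) (out : List (String × String)) : Prop := out = apply_special_handling_alt query_lower search_results current_best_match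
instance (query_lower : String) (search_results : List (List (String × String))) (current_best_match : List (String × String)) (out : List (String × String)) : Decidable (Spec_apply_special_handling query_lower search_results current_best_match out) := by unfold Spec_apply_special_handling; infer_instance

-- ===== CLAIM (what is proved, stated in full; the proofs are below) =====
def Claim_equal_apply_special_handling : Prop := ∀ (query_lower : String) (search_results : List (List (String × String))) (current_best_match : List (String × String)), Dom_apply_special_handling query_lower search_results current_best_match → Spec_apply_special_handling query_lower search_results current_best_match (apply_special_handling query_lower search_results current_best_match)

-- ===== LEMMAS AND PROOFS =====

-- sweeping with a single predicate (the head slot of a pass)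
def bPassOne (p : String → Bool) (srs : List (List (String × String))) (h : Option (List (String × String))) : Option (List (String × String)) :=
  match srs with
  | [] => h
  | r :: rest => bPassOne p rest (if h.isNone && p (pvTerm r) then some r else h)

-- first result whose term satisfies p
def bFindP (p : String → Bool) : List (List (String × String)) → Option (List (String × String))
  | [] => none
  | r :: rest => if p (pvTerm r) then some r else bFindP p rest

theorem bPass_nil (srs : List (List (String × String))) : bPass [] srs [] = [] := by
  induction srs with
  | nil => rfl
  | cons r rest ih => simpa [bPass, bUpdate] using ih

theorem bPass_cons (p : String → Bool) (ps : List (String → Bool)) (srs : List (List (String × String))) (h : Option (List (String × String))) (hs : List (Option (List (String × String)))) :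
    bPass (p :: ps) srs (h :: hs) = bPassOne p srs h :: bPass ps srs hs := by
  induction srs generalizing h hs with
  | nil => rfl
  | cons r rest ih => simp [bPass, bUpdate, bPassOne, ih]

theorem bPassOne_some (p : String → Bool) (srs : List (List (String × String))) (x : List (String × String)) :
    bPassOne p srs (some x) = some x := by
  induction srs with
  | nil => rfl
  | cons r rest ih => simpa [bPassOne] using ih

theorem bPassOne_none (p : String → Bool) (srs : List (List (String × String))) :
    bPassOne p srs none = bFindP p srs := by
  induction srs with
  | nil => rfl
  | cons r rest ih =>
    simp only [bPassOne, bFindP, Option.isNone_none, Bool.true_and]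
    by_cases hp : p (pvTerm r) = true
    · simp [hp, bPassOne_some]
    · simp [Bool.eq_false_iff.mpr hp, ih]

theorem bPass_replicate (preds : List (String → Bool)) (srs : List (List (String × String))) :
    bPass preds srs (List.replicate preds.length none) = preds.map (fun p => bFindP p srs) := by
  induction preds with
  | nil => simpa using bPass_nil srs
  | cons p ps ih => simp [List.replicate, bPass_cons, bPassOne_none, ih]

theorem bFirst_append (xs ys : List (Option (List (String × String)))) :
    bFirst (xs ++ ys) = (bFirst xs).or (bFirst ys) := by
  induction xs with
  | nil => simp [bFirst]
  | cons h hs ih => cases h <;> simp [bFirst, ih]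

-- the cross guard of A is exactly non-emptiness of B's filtered cross list
theorem cross_guard (q : String) :
    (!(["inbound", "outbound", "in campus", "out campus"].filter (fun t => PySem.Str.isIn t q)).isEmpty)
      = ["inbound", "outbound", "in campus", "out campus"].any (fun w => PySem.Str.isIn w q) := by
  simp only [List.filter_cons, List.filter_nil, List.any_cons, List.any_nil]
  cases h1 : PySem.Str.isIn "inbound" q <;> cases h2 : PySem.Str.isIn "outbound" q <;>
    cases h3 : PySem.Str.isIn "in campus" q <;> cases h4 : PySem.Str.isIn "out campus" q <;>
    decide

-- the cross predicate built from q matches a result exactly as A's elif chain tests it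
theorem cross_pred (q : String) (t : String) :
    (["inbound", "outbound", "in campus", "out campus"].filter (fun c => PySem.Str.isIn c q)).any (fun c => PySem.Str.isIn c t)
      = (PySem.Str.isIn "inbound" q && PySem.Str.isIn "inbound" t
         || PySem.Str.isIn "outbound" q && PySem.Str.isIn "outbound" t
         || PySem.Str.isIn "in campus" q && PySem.Str.isIn "in campus" t
         || PySem.Str.isIn "out campus" q && PySem.Str.isIn "out campus" t) := by
  simp only [List.filter_cons, List.filter_nil]
  cases PySem.Str.isIn "inbound" q <;> cases PySem.Str.isIn "outbound" q <;>
    cases PySem.Str.isIn "in campus" q <;> cases PySem.Str.isIn "out campus" q <;>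
    simp [List.any, Bool.or_assoc]

theorem bFindP_disj (q : String) (srs : List (List (String × String))) :
    bFindP (fun term => PySem.Str.isIn "inbound" q && PySem.Str.isIn "inbound" term
         || PySem.Str.isIn "outbound" q && PySem.Str.isIn "outbound" term
         || PySem.Str.isIn "in campus" q && PySem.Str.isIn "in campus" term
         || PySem.Str.isIn "out campus" q && PySem.Str.isIn "out campus" term) srs
      = aLoop1 q srs := by
  induction srs with
  | nil => rfl
  | cons r rest ih =>
    simp only [bFindP, aLoop1, ih]
    cases h1 : PySem.Str.isIn "inbound" q && PySem.Str.isIn "inbound" (pvTerm r) <;>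
      cases h2 : PySem.Str.isIn "outbound" q && PySem.Str.isIn "outbound" (pvTerm r) <;>
      cases h3 : PySem.Str.isIn "in campus" q && PySem.Str.isIn "in campus" (pvTerm r) <;>
      cases h4 : PySem.Str.isIn "out campus" q && PySem.Str.isIn "out campus" (pvTerm r) <;>
      simp [*]

theorem bFindP_cross (q : String) (srs : List (List (String × String))) :
    bFindP (fun term => (["inbound", "outbound", "in campus", "out campus"].filter (fun t => PySem.Str.isIn t q)).any (fun c => PySem.Str.isIn c term)) srs
      = aLoop1 q srs := by
  have hpred : (fun term => (["inbound", "outbound", "in campus", "out campus"].filter (fun t => PySem.Str.isIn t q)).any (fun c => PySem.Str.isIn c term))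
      = (fun term => PySem.Str.isIn "inbound" q && PySem.Str.isIn "inbound" term
         || PySem.Str.isIn "outbound" q && PySem.Str.isIn "outbound" term
         || PySem.Str.isIn "in campus" q && PySem.Str.isIn "in campus" term
         || PySem.Str.isIn "out campus" q && PySem.Str.isIn "out campus" term) :=
    funext fun t => cross_pred q t
  rw [hpred, bFindP_disj]

theorem bFindP_sports (srs : List (List (String × String))) :
    bFindP (fun term => PySem.Str.isIn "sports" term) srs = aLoopSports srs := by
  induction srs with
  | nil => rfl
  | cons r rest ih => simp only [bFindP, aLoopSports, ih]

theorem bFindP_culture (srs : List (List (String × String))) :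
    bFindP (fun term => PySem.Str.isIn "culture" term && PySem.Str.isIn "arts" term) srs = aLoopCulture srs := by
  induction srs with
  | nil => rfl
  | cons r rest ih => simp only [bFindP, aLoopCulture, ih]

theorem bFindP_honors (srs : List (List (String × String))) :
    bFindP (fun term => PySem.Str.isIn "graduation honors additional conditions" term) srs = aLoopHonors srs := by
  induction srs with
  | nil => rfl
  | cons r rest ih => simp only [bFindP, aLoopHonors, ih]

theorem bFindP_pwd (srs : List (List (String × String))) :
    bFindP (fun term => PySem.Str.isIn "pwd campus facilities" term) srs = aLoopPwd srs := by
  induction srs with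
  | nil => rfl
  | cons r rest ih => simp only [bFindP, aLoopPwd, ih]

theorem bFindP_mid (srs : List (List (String × String))) :
    bFindP (fun term => PySem.Str.isIn "mid-year" term && PySem.Str.isIn "policy" term) srs = aLoopMid srs := by
  induction srs with
  | nil => rfl
  | cons r rest ih => simp only [bFindP, aLoopMid, ih]

-- resolving A's three-way early-return chain against the orElse-of-options form
theorem final_match (o1 o2 o3 : Option (List (String × String))) (best : List (String × String)) :
    (match o1 with
     | some r => r
     | none => match o2 with
       | some r => r
       | none => match o3 with
         | some r => r
         | none => best) = (((o1.or o2).or o3).getD best) := by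
  cases o1 <;> cases o2 <;> cases o3 <;> rfl

theorem bFirst_map_single (p : String → Bool) (srs : List (List (String × String))) :
    bFirst ([p].map (fun p => bFindP p srs)) = bFindP p srs := by
  cases h : bFindP p srs <;> simp [bFirst, h]

-- ===== VERDICT (by name: the statement is the Claim_ definition above) =====
theorem apply_special_handling_spec : Claim_equal_apply_special_handling := by
  intro q srs best _
  unfold Spec_apply_special_handling apply_special_handling apply_special_handling_alt
  simp only [bPass_replicate]
  unfold bPreds
  rw [List.map_append, List.map_append, bFirst_append, bFirst_append]
  have top1 : bFirst ((if !(["inbound", "outbound", "in campus", "out campus"].filter (fun t => PySem.Str.isIn t q)).isEmpty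
        then [fun term => (["inbound", "outbound", "in campus", "out campus"].filter (fun t => PySem.Str.isIn t q)).any (fun c => PySem.Str.isIn c term)] else []).map (fun p => bFindP p srs)) =
      (if ["inbound", "outbound", "in campus", "out campus"].any (fun w => PySem.Str.isIn w q)
        then aLoop1 q srs else none) := by
    rw [← cross_guard]
    split
    · rw [bFirst_map_single, bFindP_cross]
    · rfl
  have top2 : bFirst ((if ["sports", "athlete", "winning athletes"].any (fun w => PySem.Str.isIn w q) then
          [fun term => PySem.Str.isIn "sports" term]
        else if ["culture", "arts", "cado"].any (fun w => PySem.Str.isIn w q) then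
          [fun term => PySem.Str.isIn "culture" term && PySem.Str.isIn "arts" term]
        else []).map (fun p => bFindP p srs)) =
      (if ["sports", "athlete", "winning athletes"].any (fun w => PySem.Str.isIn w q) then aLoopSports srs
        else if ["culture", "arts", "cado"].any (fun w => PySem.Str.isIn w q) then aLoopCulture srs else none) := by
    split
    · rw [bFirst_map_single, bFindP_sports]
    · split
      · rw [bFirst_map_single, bFindP_culture]
      · rfl
  have top3 : bFirst ((if ["conditions", "requirements", "four conditions", "five requirements", "beyond gpa"].any (fun w => PySem.Str.isIn w q) then
        (if PySem.Str.isIn "honors" q && PySem.Str.isIn "beyond" q then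
           [fun term => PySem.Str.isIn "graduation honors additional conditions" term]
         else if PySem.Str.isIn "facilities" q && (PySem.Str.isIn "disability" q || PySem.Str.isIn "pwd" q) then
           [fun term => PySem.Str.isIn "pwd campus facilities" term]
         else if PySem.Str.isIn "mid-year" q && (PySem.Str.isIn "unnecessary" q || PySem.Str.isIn "why" q) then
           [fun term => PySem.Str.isIn "mid-year" term && PySem.Str.isIn "policy" term]
         else [])
        else []).map (fun p => bFindP p srs)) =
      (if ["conditions", "requirements", "four conditions", "five requirements", "beyond gpa"].any (fun w => PySem.Str.isIn w q) then
        (if PySem.Str.isIn "honors" q && PySem.Str.isIn "beyond" q then aLoopHonors srs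
         else if PySem.Str.isIn "facilities" q && (PySem.Str.isIn "disability" q || PySem.Str.isIn "pwd" q) then aLoopPwd srs
         else if PySem.Str.isIn "mid-year" q && (PySem.Str.isIn "unnecessary" q || PySem.Str.isIn "why" q) then aLoopMid srs
         else none) else none) := by
    split
    · split
      · rw [bFirst_map_single, bFindP_honors]
      · split
        · rw [bFirst_map_single, bFindP_pwd]
        · split
          · rw [bFirst_map_single, bFindP_mid]
          · rfl
    · rfl
  rw [top1, top2, top3, final_match]
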